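-- pv_equiv track=rewrite | github.com/LeackyBee/coding_challenges | EverybodyCodes/2024) The Kingdom of Algorithmia/1) The Battle for the Farmlands.py | min_potions_needed_paired_enemies
-- ===== SOURCE A (Python) =====
-- def min_potions_needed_paired_enemies(enemies: str):
--     potions_needed = {
--         "A": 1,
--         "B": 2,
--         "C": 4,
--         "D": 6,
--         "x": -1
--     }
--
--     output = 0
--
--     for i in range(0, len(enemies), 2):
--         enemy1 = enemies[i]
--         enemy2 = enemies[i+1]
--         if enemy1 + enemy2 == "xx":
--             continue
--
--         output += potions_needed[enemy1]
--         output += potions_needed[enemy2]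
--
--     return output
-- ===== SOURCE B (Python) =====
-- def min_potions_needed_paired_enemies(enemies: str):
--     potions_needed = {"A": 1, "B": 2, "C": 4, "D": 6, "x": -1}
--     base = sum(potions_needed[c] for c in enemies)
--     xx_pairs = 0
--     for i in range(0, len(enemies), 2):
--         if enemies[i + 1] == "x" and enemies[i] == "x":
--             xx_pairs += 1
--     return base + 2 * xx_pairs
-- ===== Notes on version B (the rewrite author's own statement) =====
-- stated objective: alternative
-- what changed: Instead of A's single conditional pair loop that adds both members' costs unless the pair is skipped, B sums the cost of every character in one unconditional pass and separately counts the skipped all-x pairs, returning base + 2*xx_pairs.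
import Mathlib
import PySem

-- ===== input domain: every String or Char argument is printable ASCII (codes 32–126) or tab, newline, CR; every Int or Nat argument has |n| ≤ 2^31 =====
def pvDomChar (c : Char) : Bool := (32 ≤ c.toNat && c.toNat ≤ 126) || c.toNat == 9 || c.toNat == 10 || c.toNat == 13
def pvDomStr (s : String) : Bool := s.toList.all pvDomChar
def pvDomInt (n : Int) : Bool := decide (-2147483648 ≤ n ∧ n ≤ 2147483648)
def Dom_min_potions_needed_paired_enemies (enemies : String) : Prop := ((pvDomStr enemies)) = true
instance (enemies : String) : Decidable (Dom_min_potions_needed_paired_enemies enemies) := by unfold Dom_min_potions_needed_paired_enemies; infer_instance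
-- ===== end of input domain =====

-- B replaces A's conditional pair loop by one unconditional per-character cost sum plus a
-- correction of +2 per skipped all-x pair (objective: alternative decomposition, same cost).

-- ===== PORT A =====
-- the potions_needed dict, shared literal of both Pythons
def pvPotions : PySem.Dict Char Int :=
  PySem.Dict.ofList [('A', 1), ('B', 2), ('C', 4), ('D', 6), ('x', -1)]

-- literal port of A; index and dict lookups use default values on the inputs where
-- Python raises (those are outside Pre_); `enemy1 + enemy2 == "xx"` is exactly the
-- conjunction that both characters are 'x'
def min_potions_needed_paired_enemies (enemies : String) : Int :=
  let cs := enemies.toList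
  (PySem.List.pyRange 0 (cs.length : Int) 2).foldl (fun output i =>
    let enemy1 := PySem.List.pyGetD cs i ' '
    let enemy2 := PySem.List.pyGetD cs (i + 1) ' '
    if enemy1 = 'x' ∧ enemy2 = 'x' then output
    else output + pvPotions.getD enemy1 0 + pvPotions.getD enemy2 0) 0

-- ===== PORT B =====
-- literal port of Source B: unconditional per-character cost sum, then a count of skipped pairs
-- (Python's short-circuit `and` evaluates enemies[i+1] first here; with total pyGetD the
-- evaluation order is irrelevant, the raising inputs are outside Pre_)
def min_potions_needed_paired_enemies_alt (enemies : String) : Int :=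
  let cs := enemies.toList
  let base := cs.foldl (fun acc c => acc + pvPotions.getD c 0) 0
  let xx_pairs := (PySem.List.pyRange 0 (cs.length : Int) 2).foldl
    (fun acc i =>
      if PySem.List.pyGetD cs (i + 1) ' ' == 'x' && (PySem.List.pyGetD cs i ' ' == 'x')
      then acc + 1 else acc) (0 : Int)
  base + 2 * xx_pairs

-- ===== PRECONDITION & SPEC =====
-- Pre_ excludes exactly the inputs on which Python A raises: odd length (IndexError at
-- enemies[i+1]) and characters without a potion cost (KeyError; every such character sits
-- in a pair that is not skipped, so A always reaches the failing lookup). B raises on the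
-- same inputs.
def Pre_min_potions_needed_paired_enemies (enemies : String) : Prop :=
  enemies.toList.length % 2 = 0
    ∧ (enemies.toList.all (fun c => c ∈ (['A', 'B', 'C', 'D', 'x'] : List Char))) = true
instance (enemies : String) : Decidable (Pre_min_potions_needed_paired_enemies enemies) := by
  unfold Pre_min_potions_needed_paired_enemies; infer_instance

def pvWitness_min_potions_needed_paired_enemies : String := "xxABxxCD"

def Spec_min_potions_needed_paired_enemies (enemies : String) (out : Int) : Prop := out = min_potions_needed_paired_enemies_alt enemies
instance (enemies : String) (out : Int) : Decidable (Spec_min_potions_needed_paired_enemies enemies out) := by unfold Spec_min_potions_needed_paired_enemies; infer_instance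

-- ===== CLAIM (what is proved, stated in full; the proofs are below) =====
def Claim_equal_min_potions_needed_paired_enemies : Prop := ∀ (enemies : String), Dom_min_potions_needed_paired_enemies enemies → Pre_min_potions_needed_paired_enemies enemies → Spec_min_potions_needed_paired_enemies enemies (min_potions_needed_paired_enemies enemies)


-- ===== LEMMAS AND PROOFS =====

-- the common value both programs compute on even-length strings, pair by pair
def pvPairSpec : List Char → Int
  | a :: b :: rest =>
      (if a = 'x' ∧ b = 'x' then 0 else pvPotions.getD a 0 + pvPotions.getD b 0) + pvPairSpec rest
  | _ => 0

theorem pvRange_two_cons (m : Nat) :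
    PySem.List.pyRange 0 ((m + 2 : Nat) : Int) 2
      = 0 :: (PySem.List.pyRange 0 (m : Nat) 2).map (· + 2) := by
  rw [PySem.List.pyRange_of_pos 0 ((m + 2 : Nat) : Int) (by norm_num),
      PySem.List.pyRange_of_pos 0 ((m : Nat) : Int) (by norm_num)]
  have hcount : ∀ n : Nat, (if (0 : Int) < (n : Int) then (((n : Int) - 0 + 2 - 1) / 2).toNat else 0) = (n + 1) / 2 := by
    intro n
    cases n with
    | zero => simp
    | succ k =>
      have : ((0:Int) < ((k+1 : Nat) : Int)) := by exact_mod_cast Nat.succ_pos k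
      rw [if_pos this]
      push_cast
      omega
  rw [hcount, hcount]
  have hlen : (m + 2 + 1) / 2 = (m + 1) / 2 + 1 := by omega
  rw [hlen, List.range_succ_eq_map]
  simp only [List.map_cons, List.map_map]
  congr 1

theorem pvA_sum_eq_pairSpec : ∀ (cs : List Char), cs.length % 2 = 0 →
    ((PySem.List.pyRange 0 (cs.length : Int) 2).map (fun i =>
        if PySem.List.pyGetD cs i ' ' = 'x' ∧ PySem.List.pyGetD cs (i + 1) ' ' = 'x' then 0
        else pvPotions.getD (PySem.List.pyGetD cs i ' ') 0
              + pvPotions.getD (PySem.List.pyGetD cs (i + 1) ' ') 0)).sum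
      = pvPairSpec cs
  | [], _ => by simp [PySem.List.pyRange, pvPairSpec]
  | [_], h => by simp at h
  | a :: b :: rest, h => by
    have hrec := pvA_sum_eq_pairSpec rest (by simp only [List.length_cons] at h; omega)
    have hlen : (a :: b :: rest).length = rest.length + 2 := by simp
    rw [hlen, pvRange_two_cons rest.length, List.map_cons, List.sum_cons, List.map_map]
    have hshift : ∀ i ∈ PySem.List.pyRange 0 (rest.length : Int) 2,
        ((fun i =>
          if PySem.List.pyGetD (a :: b :: rest) i ' ' = 'x' ∧ PySem.List.pyGetD (a :: b :: rest) (i + 1) ' ' = 'x' then 0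
          else pvPotions.getD (PySem.List.pyGetD (a :: b :: rest) i ' ') 0
                + pvPotions.getD (PySem.List.pyGetD (a :: b :: rest) (i + 1) ' ') 0) ∘ (· + 2)) i
        = (fun i =>
          if PySem.List.pyGetD rest i ' ' = 'x' ∧ PySem.List.pyGetD rest (i + 1) ' ' = 'x' then 0
          else pvPotions.getD (PySem.List.pyGetD rest i ' ') 0
                + pvPotions.getD (PySem.List.pyGetD rest (i + 1) ' ') 0) i := by
      intro i hi
      obtain ⟨hi0, -, -⟩ := (PySem.List.mem_pyRange_iff_of_pos (by norm_num) i).mp hi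
      obtain ⟨n, rfl⟩ := Int.eq_ofNat_of_zero_le hi0
      have h1 : ((n : Int) + 2) = ((n + 2 : Nat) : Int) := by push_cast; ring
      have h2 : (((n + 2 : Nat) : Int) + 1) = ((n + 3 : Nat) : Int) := by push_cast; ring
      have h3 : ((n : Int) + 1) = ((n + 1 : Nat) : Int) := by push_cast; ring
      simp only [Function.comp, h1, h2, h3, PySem.List.pyGetD_natCast]
      have g1 : (a :: b :: rest).getD (n + 2) ' ' = rest.getD n ' ' := rfl
      have g2 : (a :: b :: rest).getD (n + 3) ' ' = rest.getD (n + 1) ' ' := rfl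
      rw [g1, g2]
    rw [List.map_congr_left hshift, hrec]
    simp only [pvPairSpec]
    norm_num [PySem.List.pyGetD]

theorem pvB_eq_pairSpec : ∀ (cs : List Char), cs.length % 2 = 0 →
    (List.map (fun c => pvPotions.getD c 0) cs).sum
      + 2 * ((PySem.List.pyRange 0 (cs.length : Int) 2).countP
          (fun i => PySem.List.pyGetD cs (i + 1) ' ' == 'x'
                     && (PySem.List.pyGetD cs i ' ' == 'x')) : Int)
      = pvPairSpec cs
  | [], _ => by simp [PySem.List.pyRange, pvPairSpec]
  | [_], h => by simp at h
  | a :: b :: rest, h => by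
    have hrec := pvB_eq_pairSpec rest (by simp only [List.length_cons] at h; omega)
    have hlen : (a :: b :: rest).length = rest.length + 2 := by simp
    rw [hlen, pvRange_two_cons rest.length, List.countP_cons, List.countP_map]
    have hcong : ∀ i ∈ PySem.List.pyRange 0 (rest.length : Int) 2,
        ((fun i => PySem.List.pyGetD (a :: b :: rest) (i + 1) ' ' == 'x'
                     && (PySem.List.pyGetD (a :: b :: rest) i ' ' == 'x')) ∘ (· + 2)) i
        = (fun i => PySem.List.pyGetD rest (i + 1) ' ' == 'x'
                     && (PySem.List.pyGetD rest i ' ' == 'x')) i := by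
      intro i hi
      obtain ⟨hi0, -, -⟩ := (PySem.List.mem_pyRange_iff_of_pos (by norm_num) i).mp hi
      obtain ⟨n, rfl⟩ := Int.eq_ofNat_of_zero_le hi0
      have h1 : ((n : Int) + 2) = ((n + 2 : Nat) : Int) := by push_cast; ring
      have h2 : (((n + 2 : Nat) : Int) + 1) = ((n + 3 : Nat) : Int) := by push_cast; ring
      have h3 : ((n : Int) + 1) = ((n + 1 : Nat) : Int) := by push_cast; ring
      simp only [Function.comp, h1, h2, h3, PySem.List.pyGetD_natCast]
      have g1 : (a :: b :: rest).getD (n + 2) ' ' = rest.getD n ' ' := rfl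
      have g2 : (a :: b :: rest).getD (n + 3) ' ' = rest.getD (n + 1) ' ' := rfl
      rw [g1, g2]
    have hcong2 : List.countP
          ((fun i => PySem.List.pyGetD (a :: b :: rest) (i + 1) ' ' == 'x'
              && (PySem.List.pyGetD (a :: b :: rest) i ' ' == 'x')) ∘ (· + 2))
          (PySem.List.pyRange 0 (rest.length : Int) 2)
        = List.countP
          (fun i => PySem.List.pyGetD rest (i + 1) ' ' == 'x'
              && (PySem.List.pyGetD rest i ' ' == 'x'))
          (PySem.List.pyRange 0 (rest.length : Int) 2) :=
      List.countP_congr (fun x hx => by rw [hcong x hx])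
    rw [hcong2]
    have hhead : (PySem.List.pyGetD (a :: b :: rest) (0 + 1) ' ' == 'x'
                     && (PySem.List.pyGetD (a :: b :: rest) (0 : Int) ' ' == 'x'))
        = (b == 'x' && (a == 'x')) := by norm_num [PySem.List.pyGetD]
    rw [hhead]
    simp only [List.map_cons, List.sum_cons]
    by_cases hx : a = 'x' ∧ b = 'x'
    · obtain ⟨rfl, rfl⟩ := hx
      have hps : pvPairSpec ('x' :: 'x' :: rest) = 0 + pvPairSpec rest := by
        simp [pvPairSpec]
      have hpx : pvPotions.getD 'x' 0 = -1 := rfl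
      rw [hps, ← hrec, hpx]
      simp only [beq_self_eq_true, Bool.and_self, if_true]
      push_cast
      ring
    · have hd : (b == 'x' && (a == 'x')) = false := by
        by_cases hb' : b = 'x'
        · have ha' : ¬ a = 'x' := fun ha'' => hx ⟨ha'', hb'⟩
          simp [ha']
        · simp [hb']
      have hps : pvPairSpec (a :: b :: rest)
          = (if a = 'x' ∧ b = 'x' then 0 else pvPotions.getD a 0 + pvPotions.getD b 0)
              + pvPairSpec rest := rfl
      rw [hps, if_neg hx, ← hrec, hd]
      simp
      ring

-- ===== VERDICT (by name: the statement is the Claim_ definition above) =====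
theorem min_potions_needed_paired_enemies_spec : Claim_equal_min_potions_needed_paired_enemies := by
  intro enemies _ hpre
  unfold Spec_min_potions_needed_paired_enemies
  unfold min_potions_needed_paired_enemies min_potions_needed_paired_enemies_alt
  obtain ⟨heven, -⟩ := hpre
  set cs := enemies.toList with hcs
  have hA : ∀ (l : List Int) (init : Int),
      l.foldl (fun output i =>
        let enemy1 := PySem.List.pyGetD cs i ' '
        let enemy2 := PySem.List.pyGetD cs (i + 1) ' '
        if enemy1 = 'x' ∧ enemy2 = 'x' then output
        else output + pvPotions.getD enemy1 0 + pvPotions.getD enemy2 0) init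
      = l.foldl (fun output i => output +
          (if PySem.List.pyGetD cs i ' ' = 'x' ∧ PySem.List.pyGetD cs (i + 1) ' ' = 'x' then 0
           else pvPotions.getD (PySem.List.pyGetD cs i ' ') 0
                + pvPotions.getD (PySem.List.pyGetD cs (i + 1) ' ') 0)) init := by
    intro l
    induction l with
    | nil => intro init; rfl
    | cons x xs ih =>
      intro init
      simp only [List.foldl_cons, ih]
      congr 1
      split_ifs with hx
      · ring
      · ring
  simp only [hA]
  rw [PySem.List.foldl_add]
  rw [PySem.List.foldl_add]
  rw [PySem.List.foldl_count_if
        (fun i => PySem.List.pyGetD cs (i + 1) ' ' == 'x' && (PySem.List.pyGetD cs i ' ' == 'x'))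
        (PySem.List.pyRange 0 (cs.length : Int) 2) 0]
  simp only [zero_add]
  rw [pvA_sum_eq_pairSpec cs heven, ← pvB_eq_pairSpec cs heven]
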